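-- pv_equiv track=rewrite | github.com/renatotn7/Squad-Bible-Explorer-PTBR | parafrase/analiseIgualdade2.py | tokenisealem
-- ===== SOURCE A (Python) =====
-- def tokenisealem(frasesa):
--     retornos = []
--
--     for frasea in frasesa:
--         subfrases = []
--         if ";" in frasea:
--             subfrases = frasea.split(";")
--             countfrasesreais = 0
--
--             for i in range(0, len(subfrases) - 1):
--
--                 retornos.append(subfrases[i] + ";")
--             retornos.append(subfrases[len(subfrases) - 1])
--
--         elif ":" in frasea:
--             subfrases = frasea.split(":")
--
--             for i in range(0, len(subfrases) - 1):
--                 retornos.append(subfrases[i] + ":")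
--             retornos.append(subfrases[len(subfrases) - 1])
--         else:
--             retornos.append(frasea)
--     return retornos
-- ===== SOURCE B (Python) =====
-- def _delim_of(phrase):
--     if ";" in phrase:
--         return ";"
--     if ":" in phrase:
--         return ":"
--     return None
--
--
-- def tokenisealem(frasesa):
--     retornos = []
--     for frasea in frasesa:
--         d = _delim_of(frasea)
--         if d is None:
--             retornos.append(frasea)
--         else:
--             token = ""
--             for ch in frasea:
--                 if ch == d:
--                     retornos.append(token + d)
--                     token = ""
--                 else:
--                     token += ch
--             retornos.append(token)
--     return retornos
-- ===== Notes on version B (the rewrite author's own statement) =====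
-- stated objective: alternative
-- what changed: Replaces str.split plus an index loop over range(len-1) with a single character-by-character scan that emits each token (with its delimiter) as it is completed, keeping the ;-over-: priority.
import Mathlib
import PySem

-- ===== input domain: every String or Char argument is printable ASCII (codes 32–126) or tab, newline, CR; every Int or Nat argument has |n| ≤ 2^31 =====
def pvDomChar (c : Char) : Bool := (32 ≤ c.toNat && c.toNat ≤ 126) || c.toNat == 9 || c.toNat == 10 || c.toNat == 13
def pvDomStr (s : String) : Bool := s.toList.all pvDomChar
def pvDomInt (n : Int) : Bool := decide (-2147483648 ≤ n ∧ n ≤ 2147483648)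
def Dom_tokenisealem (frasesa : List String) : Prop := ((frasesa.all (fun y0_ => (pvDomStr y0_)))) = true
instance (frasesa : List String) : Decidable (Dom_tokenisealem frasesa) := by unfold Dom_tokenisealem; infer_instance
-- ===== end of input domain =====

-- B replaces str.split + an index loop with a single char-by-char scan emitting tokens as completed (alternative decomposition, same cost).

-- ===== PORT A =====
def tokenisealem (frasesa : List String) : List String :=
  frasesa.foldl (fun retornos frasea =>
    if PySem.Str.isIn ";" frasea then
      let subfrases := (PySem.Str.split? frasea ";").getD []
      let retornos := (PySem.List.pyRange 0 ((subfrases.length : Int) - 1) 1).foldl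
        (fun acc i => acc ++ [PySem.List.pyGetD subfrases i "" ++ ";"]) retornos
      retornos ++ [PySem.List.pyGetD subfrases ((subfrases.length : Int) - 1) ""]
    else if PySem.Str.isIn ":" frasea then
      let subfrases := (PySem.Str.split? frasea ":").getD []
      let retornos := (PySem.List.pyRange 0 ((subfrases.length : Int) - 1) 1).foldl
        (fun acc i => acc ++ [PySem.List.pyGetD subfrases i "" ++ ":"]) retornos
      retornos ++ [PySem.List.pyGetD subfrases ((subfrases.length : Int) - 1) ""]
    else retornos ++ [frasea]) []

-- ===== PORT B =====
def pvDelimOf (phrase : String) : Option Char :=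
  if PySem.Str.isIn ";" phrase then some ';'
  else if PySem.Str.isIn ":" phrase then some ':'
  else none

def tokenisealem_alt (frasesa : List String) : List String :=
  frasesa.foldl (fun retornos frasea =>
    match pvDelimOf frasea with
    | none => retornos ++ [frasea]
    | some d =>
      let st := frasea.toList.foldl
        (fun (st : List String × List Char) ch =>
          if ch == d then (st.1 ++ [String.ofList (st.2 ++ [d])], [])
          else (st.1, st.2 ++ [ch]))
        (retornos, [])
      st.1 ++ [String.ofList st.2]) []

-- ===== PRECONDITION & SPEC =====
def Spec_tokenisealem (frasesa : List String) (out : List String) : Prop := out = tokenisealem_alt frasesa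
instance (frasesa : List String) (out : List String) : Decidable (Spec_tokenisealem frasesa out) := by unfold Spec_tokenisealem; infer_instance

-- ===== CLAIM (what is proved, stated in full; the proofs are below) =====
def Claim_equal_tokenisealem : Prop := ∀ (frasesa : List String), Dom_tokenisealem frasesa → Spec_tokenisealem frasesa (tokenisealem frasesa)

-- ===== LEMMAS AND PROOFS =====

-- split on a single character, defined structurally (always nonempty)
def splitC (d : Char) : List Char → List (List Char)
  | [] => [[]]
  | c :: cs =>
    if c = d then [] :: splitC d cs
    else
      match splitC d cs with
      | [] => [[c]]
      | p :: ps => (c :: p) :: ps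

lemma splitC_ne_nil (d : Char) (cs : List Char) : splitC d cs ≠ [] := by
  cases cs with
  | nil => simp [splitC]
  | cons c cs =>
    simp only [splitC]
    split
    · simp
    · split <;> simp_all

-- the tokens both programs emit for one phrase: every part but the last carries the delimiter
def outToks (d : Char) (t : List Char) : List (List Char) → List String
  | [] => []
  | [p] => [String.ofList (t ++ p)]
  | p :: q :: ps => String.ofList (t ++ p ++ [d]) :: outToks d [] (q :: ps)

lemma go_eq_splitC (d : Char) : ∀ (fuel : Nat) (cs cur : List Char) (acc : List (List Char)),
    cs.length < fuel →
    PySem.Chars.splitOn.go [d] fuel cs cur acc =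
      acc.reverse ++ (cur.reverse ++ (splitC d cs).headD []) :: (splitC d cs).tail := by
  intro fuel
  induction fuel with
  | zero => intro cs cur acc h; omega
  | succ fuel ih =>
    intro cs cur acc h
    cases cs with
    | nil =>
      rw [PySem.Chars.splitOn.go.eq_def]
      simp [splitC]
    | cons c rest =>
      rw [PySem.Chars.splitOn.go.eq_def]
      by_cases hc : c = d
      · subst hc
        have hpre : List.isPrefixOf [c] (c :: rest) = true := by simp [List.isPrefixOf]
        simp only [hpre, if_true, List.length_cons, List.drop_succ_cons, List.length_nil, List.drop_zero]
        rw [ih rest [] (cur.reverse :: acc) (by simpa using Nat.lt_of_succ_lt_succ h)]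
        rcases hsp : splitC c rest with _ | ⟨p, ps⟩
        · exact absurd hsp (splitC_ne_nil c rest)
        · simp [splitC, hsp]
      · have hpre : List.isPrefixOf [d] (c :: rest) = false := by
          simp [List.isPrefixOf]
          exact fun hdc => absurd hdc.symm hc
        simp only [hpre, Bool.false_eq_true, if_false]
        rw [ih rest (c :: cur) acc (by simpa using Nat.lt_of_succ_lt_succ h)]
        rcases hsp : splitC d rest with _ | ⟨p, ps⟩
        · exact absurd hsp (splitC_ne_nil d rest)
        · simp [splitC, hc, hsp]

lemma splitOn_eq_splitC (d : Char) (cs : List Char) :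
    PySem.Chars.splitOn cs [d] = splitC d cs := by
  unfold PySem.Chars.splitOn
  rw [go_eq_splitC d (cs.length + 1) cs [] [] (by omega)]
  rcases hsp : splitC d cs with _ | ⟨p, ps⟩
  · exact absurd hsp (splitC_ne_nil d cs)
  · simp

lemma outToks_shift (d c : Char) (t p : List Char) (ps : List (List Char)) :
    outToks d (t ++ [c]) (p :: ps) = outToks d t ((c :: p) :: ps) := by
  cases ps with
  | nil => simp [outToks]
  | cons q qs => simp [outToks]

lemma bscan (d : Char) : ∀ (cs : List Char) (r : List String) (t : List Char),
    (cs.foldl (fun (st : List String × List Char) ch =>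
        if ch == d then (st.1 ++ [String.ofList (st.2 ++ [d])], [])
        else (st.1, st.2 ++ [ch])) (r, t)).1
      ++ [String.ofList (cs.foldl (fun (st : List String × List Char) ch =>
        if ch == d then (st.1 ++ [String.ofList (st.2 ++ [d])], [])
        else (st.1, st.2 ++ [ch])) (r, t)).2]
    = r ++ outToks d t (splitC d cs) := by
  intro cs
  induction cs with
  | nil => intro r t; simp [outToks, splitC]
  | cons c cs ih =>
    intro r t
    by_cases hc : c = d
    · subst hc
      simp only [List.foldl_cons, BEq.rfl, if_true]
      rw [ih]
      rcases hsp : splitC c cs with _ | ⟨p, ps⟩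
      · exact absurd hsp (splitC_ne_nil c cs)
      · simp [splitC, hsp, outToks]
    · have hbeq : (c == d) = false := by simp [hc]
      simp only [List.foldl_cons, hbeq, Bool.false_eq_true, if_false]
      rw [ih]
      rcases hsp : splitC d cs with _ | ⟨p, ps⟩
      · exact absurd hsp (splitC_ne_nil d cs)
      · rw [outToks_shift d c t p ps]
        simp [splitC, hc, hsp]

lemma outToks_char (d : Char) (ps : List (List Char)) (h : ps ≠ []) :
    outToks d [] ps =
      (ps.dropLast).map (fun p => String.ofList p ++ String.ofList [d]) ++ [String.ofList (ps.getLast h)] := by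
  induction ps with
  | nil => exact absurd rfl h
  | cons p ps ih =>
    cases ps with
    | nil => simp [outToks]
    | cons q qs =>
      rw [show outToks d [] (p :: q :: qs)
            = String.ofList ([] ++ p ++ [d]) :: outToks d [] (q :: qs) from rfl]
      rw [ih (by simp)]
      simp [String.ofList_append, List.getLast_cons]

lemma aside (parts : List String) (h : parts ≠ []) (r : List String) (dstr : String) :
    ((PySem.List.pyRange 0 ((parts.length : Int) - 1) 1).foldl
        (fun acc i => acc ++ [PySem.List.pyGetD parts i "" ++ dstr]) r)
      ++ [PySem.List.pyGetD parts ((parts.length : Int) - 1) ""]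
    = r ++ parts.dropLast.map (· ++ dstr) ++ [parts.getLast h] := by
  have hpos : 0 < parts.length := List.length_pos_of_ne_nil h
  have hd : parts.dropLast.length = parts.length - 1 := List.length_dropLast
  have hlen : ((parts.length : Int) - 1) = ((parts.dropLast.length : Nat) : Int) := by
    rw [hd]; omega
  rw [hlen]
  rw [PySem.List.foldl_congr_mem _ _
      (fun acc j => acc ++ [PySem.List.pyGetD parts.dropLast j "" ++ dstr]) r ?hcong]
  case hcong =>
    intro acc x hx
    rw [PySem.List.mem_pyRange_one] at hx
    obtain ⟨hx0, hx1⟩ := hx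
    show acc ++ [PySem.List.pyGetD parts x "" ++ dstr]
        = acc ++ [PySem.List.pyGetD parts.dropLast x "" ++ dstr]
    rw [PySem.List.pyGetD_eq_getElem parts.dropLast "" hx0 hx1,
      PySem.List.pyGetD_eq_getElem parts "" hx0 (by rw [hd] at hx1; omega),
      List.getElem_dropLast]
  rw [PySem.List.foldl_pyRange_pyGetD' parts.dropLast ""
      (fun acc x => acc ++ [x ++ dstr]) r (le_refl 0)]
  rw [Int.toNat_zero, List.drop_zero]
  rw [hlen.symm]
  rw [PySem.List.pyGetD_eq_getElem parts "" (by omega) (by omega)]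
  rw [PySem.List.foldl_append_singleton_eq_map]
  have hidx : ((parts.length : Int) - 1).toNat = parts.length - 1 := by omega
  simp only [hidx, List.getLast_eq_getElem]

lemma branch_eq (d : Char) (r : List String) (cs : List Char) :
    ((PySem.List.pyRange 0 ((((splitC d cs).map String.ofList).length : Int) - 1) 1).foldl
        (fun acc i => acc ++ [PySem.List.pyGetD ((splitC d cs).map String.ofList) i "" ++ String.ofList [d]]) r)
      ++ [PySem.List.pyGetD ((splitC d cs).map String.ofList)
            ((((splitC d cs).map String.ofList).length : Int) - 1) ""]
    = (cs.foldl
        (fun (st : List String × List Char) ch =>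
          if ch == d then (st.1 ++ [String.ofList (st.2 ++ [d])], [])
          else (st.1, st.2 ++ [ch])) (r, [])).1
      ++ [String.ofList (cs.foldl
        (fun (st : List String × List Char) ch =>
          if ch == d then (st.1 ++ [String.ofList (st.2 ++ [d])], [])
          else (st.1, st.2 ++ [ch])) (r, [])).2] := by
  rw [aside _ (by simp [splitC_ne_nil]) r (String.ofList [d])]
  rw [bscan d cs r []]
  rw [outToks_char d _ (splitC_ne_nil d cs)]
  simp [← List.map_dropLast, List.getLast_map]

lemma step_eq (r : List String) (s : String) :
    (if PySem.Str.isIn ";" s then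
      let subfrases := (PySem.Str.split? s ";").getD []
      let r' := (PySem.List.pyRange 0 ((subfrases.length : Int) - 1) 1).foldl
        (fun acc i => acc ++ [PySem.List.pyGetD subfrases i "" ++ ";"]) r
      r' ++ [PySem.List.pyGetD subfrases ((subfrases.length : Int) - 1) ""]
    else if PySem.Str.isIn ":" s then
      let subfrases := (PySem.Str.split? s ":").getD []
      let r' := (PySem.List.pyRange 0 ((subfrases.length : Int) - 1) 1).foldl
        (fun acc i => acc ++ [PySem.List.pyGetD subfrases i "" ++ ":"]) r
      r' ++ [PySem.List.pyGetD subfrases ((subfrases.length : Int) - 1) ""]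
    else r ++ [s])
    = (match pvDelimOf s with
    | none => r ++ [s]
    | some d =>
      let st := s.toList.foldl
        (fun (st : List String × List Char) ch =>
          if ch == d then (st.1 ++ [String.ofList (st.2 ++ [d])], [])
          else (st.1, st.2 ++ [ch]))
        (r, [])
      st.1 ++ [String.ofList st.2]) := by
  by_cases h1 : PySem.Str.isIn ";" s
  · have hd : pvDelimOf s = some ';' := by simp [pvDelimOf, -PySem.Str.isIn_eq, h1]
    have hsplit : (PySem.Str.split? s ";").getD [] = (splitC ';' s.toList).map String.ofList := by
      unfold PySem.Str.split?
      simp [PySem.Chars.split?, splitOn_eq_splitC, show (";" : String).toList = [';'] from rfl]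
    simp only [h1, if_true, hd, hsplit]
    exact branch_eq ';' r s.toList
  · by_cases h2 : PySem.Str.isIn ":" s
    · have hd : pvDelimOf s = some ':' := by simp [pvDelimOf, -PySem.Str.isIn_eq, h1, h2]
      have hsplit : (PySem.Str.split? s ":").getD [] = (splitC ':' s.toList).map String.ofList := by
        unfold PySem.Str.split?
        simp [PySem.Chars.split?, splitOn_eq_splitC, show (":" : String).toList = [':'] from rfl]
      simp only [h1, Bool.false_eq_true, if_false, h2, if_true, hd, hsplit]
      exact branch_eq ':' r s.toList
    · have hd : pvDelimOf s = none := by simp [pvDelimOf, -PySem.Str.isIn_eq, h1, h2]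
      simp only [h1, h2, Bool.false_eq_true, if_false, hd]

lemma tok_eq (frasesa : List String) : tokenisealem frasesa = tokenisealem_alt frasesa := by
  unfold tokenisealem tokenisealem_alt
  induction frasesa using List.reverseRecOn with
  | nil => rfl
  | append_singleton xs x ih =>
    rw [List.foldl_append, List.foldl_append, ih]
    simpa using step_eq _ x

-- ===== VERDICT (by name: the statement is the Claim_ definition above) =====
theorem tokenisealem_spec : Claim_equal_tokenisealem :=
  fun frasesa _ => tok_eq frasesa
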